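-- pv_equiv track=rewrite | github.com/bryceroche/mycelium | scripts/math_full_7b_vllm.py | extract_gold_answer
-- ===== SOURCE A (Python) =====
-- def extract_gold_answer(solution_text: str) -> str:
--     """Extract the boxed answer from MATH solution text."""
--     # Handle nested braces properly
--     start = solution_text.find(r'\boxed{')
--     if start != -1:
--         brace_count = 1
--         content_start = start + 7
--         i = content_start
--         while i < len(solution_text) and brace_count > 0:
--             if solution_text[i] == '{':
--                 brace_count += 1
--             elif solution_text[i] == '}':
--                 brace_count -= 1
--             i += 1
--         if brace_count == 0:
--             return solution_text[content_start:i-1]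
--     return ""
-- ===== SOURCE B (Python) =====
-- def extract_gold_answer(solution_text: str) -> str:
--     """Extract the boxed answer from MATH solution text."""
--     start = solution_text.find(r'\boxed{')
--     if start == -1:
--         return ""
--     out = []
--     depth = 1
--     for ch in solution_text[start + 7:]:
--         if ch == '{':
--             depth += 1
--         elif ch == '}':
--             depth -= 1
--             if depth == 0:
--                 return ''.join(out)
--         out.append(ch)
--     return ""
-- ===== Notes on version B (the rewrite author's own statement) =====
-- stated objective: alternative
-- what changed: A tracks an integer index and a brace counter over the whole string and returns a slice computed from the final index; B streams over the tail after \boxed{, accumulating content characters directly and returning the accumulated content the moment the matching closing brace is reached, with no index arithmetic or slicing.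
import Mathlib
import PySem

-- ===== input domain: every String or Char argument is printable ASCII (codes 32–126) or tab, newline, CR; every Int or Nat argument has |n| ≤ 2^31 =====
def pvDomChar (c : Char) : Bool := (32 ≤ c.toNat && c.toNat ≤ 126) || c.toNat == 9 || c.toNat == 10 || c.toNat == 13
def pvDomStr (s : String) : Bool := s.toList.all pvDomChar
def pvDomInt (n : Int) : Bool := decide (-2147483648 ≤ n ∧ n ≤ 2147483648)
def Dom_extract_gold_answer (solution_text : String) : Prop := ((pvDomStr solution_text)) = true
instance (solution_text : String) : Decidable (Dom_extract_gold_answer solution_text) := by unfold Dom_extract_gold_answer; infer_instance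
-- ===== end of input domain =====

-- B replaces A's index-and-slice scan by a streaming accumulator with an early return; objective: alternative decomposition, same cost.

-- ===== PORT A =====
-- A's while loop over s[i]: recursion over the remaining characters, carrying the absolute index i and brace_count.
def pvALoop (rest : List Char) (i : Nat) (count : Nat) : Nat × Nat :=
  match rest with
  | [] => (i, count)
  | c :: rs =>
    if count = 0 then (i, count)
    else pvALoop rs (i + 1) (if c = '{' then count + 1 else if c = '}' then count - 1 else count)

def extract_gold_answer (solution_text : String) : String :=
  let cs := solution_text.toList
  let start := PySem.Str.find solution_text "\\boxed{"
  if start ≠ -1 then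
    let contentStart := start.toNat + 7
    let r := pvALoop (cs.drop contentStart) contentStart 1
    if r.2 = 0 then
      String.ofList (PySem.List.slice cs (some (contentStart : Int)) (some ((r.1 : Int) - 1)))
    else ""
  else ""

-- ===== PORT B =====
-- B's for-loop: accumulate content characters, return them when depth hits 0.
def pvBLoop (rest : List Char) (depth : Nat) (acc : List Char) : String :=
  match rest with
  | [] => ""
  | c :: rs =>
    if c = '{' then pvBLoop rs (depth + 1) (acc ++ [c])
    else if c = '}' then
      if depth - 1 = 0 then String.ofList acc
      else pvBLoop rs (depth - 1) (acc ++ [c])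
    else pvBLoop rs depth (acc ++ [c])

def extract_gold_answer_alt (solution_text : String) : String :=
  let start := PySem.Str.find solution_text "\\boxed{"
  if start = -1 then ""
  else pvBLoop (solution_text.toList.drop (start.toNat + 7)) 1 []

-- ===== PRECONDITION & SPEC =====
def Spec_extract_gold_answer (solution_text : String) (out : String) : Prop := out = extract_gold_answer_alt solution_text
instance (solution_text : String) (out : String) : Decidable (Spec_extract_gold_answer solution_text out) := by unfold Spec_extract_gold_answer; infer_instance

-- ===== CLAIM (what is proved, stated in full; the proofs are below) =====
def Claim_equal_extract_gold_answer : Prop := ∀ (solution_text : String), Dom_extract_gold_answer solution_text → Spec_extract_gold_answer solution_text (extract_gold_answer solution_text)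

-- ===== LEMMAS AND PROOFS =====
lemma pvALoop_zero (rest : List Char) (i : Nat) : pvALoop rest i 0 = (i, 0) := by
  cases rest <;> simp [pvALoop]

lemma pvALoop_fst_ge (rest : List Char) (i count : Nat) : i ≤ (pvALoop rest i count).1 := by
  induction rest generalizing i count with
  | nil => simp [pvALoop]
  | cons c rs ih =>
    simp only [pvALoop]
    split
    · simp
    · exact le_trans (Nat.le_succ i) (ih (i + 1) _)

lemma pvALoop_zero_fst (rest : List Char) (i count : Nat) (hc : 0 < count)
    (h : (pvALoop rest i count).2 = 0) : i + 1 ≤ (pvALoop rest i count).1 := by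
  cases rest with
  | nil => simp [pvALoop] at h; omega
  | cons c rs =>
    simp only [pvALoop, if_neg (by omega : ¬ count = 0)] at h ⊢
    exact pvALoop_fst_ge rs (i + 1) _

lemma loop_eq (rest : List Char) (depth i : Nat) (acc : List Char) (hd : 0 < depth) :
    pvBLoop rest depth acc =
      (if (pvALoop rest i depth).2 = 0
       then String.ofList (acc ++ rest.take ((pvALoop rest i depth).1 - i - 1))
       else "") := by
  induction rest generalizing depth i acc with
  | nil => simp [pvBLoop, pvALoop]; omega
  | cons c rs ih =>
    simp only [pvBLoop, pvALoop, if_neg (show ¬ depth = 0 by omega)]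
    by_cases h1 : c = '{'
    · rw [if_pos h1, if_pos h1]
      rw [ih (depth + 1) (i + 1) (acc ++ [c]) (by omega)]
      split
      · next hz =>
        have hge := pvALoop_zero_fst rs (i + 1) (depth + 1) (by omega) hz
        have he : (pvALoop rs (i + 1) (depth + 1)).1 - i - 1
             = ((pvALoop rs (i + 1) (depth + 1)).1 - (i + 1) - 1) + 1 := by omega
        rw [he, List.take_succ_cons]
        simp
      · rfl
    · by_cases h2 : c = '}'
      · rw [if_neg h1, if_neg h1, if_pos h2, if_pos h2]
        by_cases hd1 : depth = 1
        · subst hd1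
          rw [pvALoop_zero, if_pos (show (1:Nat) - 1 = 0 from rfl)]
          simp
        · have hdz : ¬ depth - 1 = 0 := by omega
          rw [if_neg hdz]
          rw [ih (depth - 1) (i + 1) (acc ++ [c]) (by omega)]
          split
          · next hz =>
            have hge := pvALoop_zero_fst rs (i + 1) (depth - 1) (by omega) hz
            have he : (pvALoop rs (i + 1) (depth - 1)).1 - i - 1
                 = ((pvALoop rs (i + 1) (depth - 1)).1 - (i + 1) - 1) + 1 := by omega
            rw [he, List.take_succ_cons]
            simp
          · rfl
      · rw [if_neg h1, if_neg h1, if_neg h2, if_neg h2]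
        rw [ih depth (i + 1) (acc ++ [c]) hd]
        split
        · next hz =>
          have hge := pvALoop_zero_fst rs (i + 1) depth hd hz
          have he : (pvALoop rs (i + 1) depth).1 - i - 1
               = ((pvALoop rs (i + 1) depth).1 - (i + 1) - 1) + 1 := by omega
          rw [he, List.take_succ_cons]
          simp
        · rfl

-- ===== VERDICT (by name: the statement is the Claim_ definition above) =====
theorem extract_gold_answer_spec : Claim_equal_extract_gold_answer := by
  intro s _
  unfold Spec_extract_gold_answer extract_gold_answer extract_gold_answer_alt
  by_cases h : PySem.Str.find s "\\boxed{" = -1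
  · rw [if_neg (by simpa using h), if_pos h]
  · rw [if_pos h, if_neg h]
    rw [loop_eq (s.toList.drop ((PySem.Str.find s "\\boxed{").toNat + 7))
          1 ((PySem.Str.find s "\\boxed{").toNat + 7) [] (by omega)]
    set cS := (PySem.Str.find s "\\boxed{").toNat + 7 with hcS
    set r := pvALoop (s.toList.drop cS) cS 1 with hr
    by_cases hz : r.2 = 0
    · have hge : cS + 1 ≤ r.1 := pvALoop_zero_fst _ cS 1 (by omega) hz
      rw [if_pos hz, if_pos hz]
      have hb : ((r.1 : Int) - 1) = ((r.1 - 1 : Nat) : Int) := by omega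
      rw [hb, PySem.List.slice_natCast]
      simp only [List.nil_append]
      congr 2
      omega
    · rw [if_neg hz, if_neg hz]
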